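-- pv_equiv track=rewrite | github.com/TrellixVulnTeam/TIL_6JOV | PycharmProjects/pythonbasic1/python practice/ss4practice.py | printTime
-- ===== SOURCE A (Python) =====
-- def printTime(p1,p2,page):
--
--     prt_page=0
--     time=0
--     while prt_page<page:
--         time+=1
--         if time%p1==0:
--             prt_page+=1
--         if time%p2==0:
--             prt_page+=1
--     return time
-- ===== SOURCE B (Python) =====
-- def printTime(p1, p2, page):
--     # Binary search for the least t >= 1 with t//|p1| + t//|p2| >= page.
--     if page <= 0:
--         return 0
--     a, b = abs(p1), abs(p2)
--     lo, hi = 0, min(a, b) * page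
--     while hi - lo > 1:
--         mid = (lo + hi) // 2
--         if mid // a + mid // b >= page:
--             hi = mid
--         else:
--             lo = mid
--     return hi
-- ===== Notes on version B (the rewrite author's own statement) =====
-- stated objective: faster
-- what changed: Replaced the one-tick-at-a-time simulation loop with a binary search for the least t with t//|p1| + t//|p2| >= page.
-- outside the precondition, e.g. on printTime(0, 3, 2): A raises ZeroDivisionError, B returns 0
import Mathlib
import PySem

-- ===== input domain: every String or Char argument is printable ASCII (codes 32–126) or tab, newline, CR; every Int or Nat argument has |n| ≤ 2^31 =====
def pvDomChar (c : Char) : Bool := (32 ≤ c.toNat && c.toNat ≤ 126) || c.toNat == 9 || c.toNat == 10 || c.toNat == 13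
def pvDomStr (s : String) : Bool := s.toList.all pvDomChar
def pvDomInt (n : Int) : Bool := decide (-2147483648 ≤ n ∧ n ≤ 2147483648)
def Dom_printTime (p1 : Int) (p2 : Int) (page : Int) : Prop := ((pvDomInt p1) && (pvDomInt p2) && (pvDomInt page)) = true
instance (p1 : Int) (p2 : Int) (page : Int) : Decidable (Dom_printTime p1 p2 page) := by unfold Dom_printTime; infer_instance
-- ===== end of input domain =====

-- B replaces A's tick-by-tick simulation with a binary search for the least t
-- with t//|p1| + t//|p2| >= page (faster: O(log answer) instead of O(answer)).

-- ===== PORT A =====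
-- the while-loop of A; fuel is only a totality guard (A terminates whenever p1 ≠ 0 ∧ p2 ≠ 0 or page ≤ 0)
def printTimeLoop (p1 p2 page prt time : Int) : Nat → Int
  | 0 => time
  | fuel + 1 =>
    if prt < page then
      let time' := time + 1
      let prt' := if PySem.Int.mod time' p1 = 0 then prt + 1 else prt
      let prt'' := if PySem.Int.mod time' p2 = 0 then prt' + 1 else prt'
      printTimeLoop p1 p2 page prt'' time' fuel
    else time

def printTime (p1 : Int) (p2 : Int) (page : Int) : Int :=
  printTimeLoop p1 p2 page 0 0 ((min |p1| |p2| * page).toNat + 1)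

-- ===== PORT B =====
-- binary search keeping cnt lo < page ≤ cnt hi, where cnt t = t//a + t//b
def bsLoop (a b page lo hi : Int) : Nat → Int
  | 0 => hi
  | fuel + 1 =>
    if 1 < hi - lo then
      let mid := PySem.Int.floordiv (lo + hi) 2
      if page ≤ PySem.Int.floordiv mid a + PySem.Int.floordiv mid b then
        bsLoop a b page lo mid fuel
      else
        bsLoop a b page mid hi fuel
    else hi

def printTime_alt (p1 : Int) (p2 : Int) (page : Int) : Int :=
  if page ≤ 0 then 0
  else bsLoop |p1| |p2| page 0 (min |p1| |p2| * page) ((min |p1| |p2| * page).toNat)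

-- ===== PRECONDITION & SPEC =====
-- Pre_ excludes exactly the inputs where A raises ZeroDivisionError: a zero printer
-- period with page > 0 (with page ≤ 0 the loop body never runs and A returns 0).
def Pre_printTime (p1 : Int) (p2 : Int) (page : Int) : Prop :=
  (p1 ≠ 0 ∧ p2 ≠ 0) ∨ page ≤ 0
instance (p1 : Int) (p2 : Int) (page : Int) : Decidable (Pre_printTime p1 p2 page) := by
  unfold Pre_printTime; infer_instance

def pvWitness_printTime : Int × Int × Int := (2, 3, 5)

def Spec_printTime (p1 : Int) (p2 : Int) (page : Int) (out : Int) : Prop := out = printTime_alt p1 p2 page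
instance (p1 : Int) (p2 : Int) (page : Int) (out : Int) : Decidable (Spec_printTime p1 p2 page out) := by unfold Spec_printTime; infer_instance

-- ===== CLAIM (what is proved, stated in full; the proofs are below) =====
def Claim_equal_printTime : Prop := ∀ (p1 : Int) (p2 : Int) (page : Int), Dom_printTime p1 p2 page → Pre_printTime p1 p2 page → Spec_printTime p1 p2 page (printTime p1 p2 page)

-- ===== LEMMAS AND PROOFS =====

-- number of 'page' events up to and including time t (for positive periods a, b)
def cnt (a b t : Int) : Int := t / a + t / b

theorem cnt_mono (a b s t : Int) (ha : 0 < a) (hb : 0 < b) (h : s ≤ t) :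
    cnt a b s ≤ cnt a b t :=
  add_le_add (Int.ediv_le_ediv ha h) (Int.ediv_le_ediv hb h)

theorem ediv_succ (a t : Int) (ha : 0 < a) :
    (t + 1) / a = t / a + (if a ∣ (t + 1) then 1 else 0) := by
  by_cases h : a ∣ (t + 1)
  · obtain ⟨k, hk⟩ := h
    have h1 : (t + 1) / a = k := by
      rw [hk, Int.mul_ediv_cancel_left _ (ne_of_gt ha)]
    have h2 : t / a = k - 1 := by
      have ht : t = (a - 1) + a * (k - 1) := by linarith [hk]
      rw [ht, Int.add_mul_ediv_left _ _ (ne_of_gt ha),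
        Int.ediv_eq_zero_of_lt (by omega) (by omega)]
      ring
    have hd : a ∣ t + 1 := ⟨k, hk⟩
    rw [h1, h2]
    simp [hd]
  · simp only [h, if_false, add_zero]
    have hd := Int.mul_ediv_add_emod t a
    have hr0 := Int.emod_nonneg t (ne_of_gt ha)
    have hrlt := Int.emod_lt_of_pos t ha
    have hne : t % a + 1 ≠ a := by
      intro hc
      apply h
      exact ⟨t / a + 1, by linarith⟩
    have ht : t + 1 = (t % a + 1) + a * (t / a) := by linarith
    rw [ht, Int.add_mul_ediv_left _ _ (ne_of_gt ha),
      Int.ediv_eq_zero_of_lt (by omega) (by omega)]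
    ring

theorem cnt_succ (a b t : Int) (ha : 0 < a) (hb : 0 < b) :
    cnt a b (t + 1) =
      cnt a b t + (if a ∣ (t + 1) then 1 else 0) + (if b ∣ (t + 1) then 1 else 0) := by
  simp only [cnt, ediv_succ a t ha, ediv_succ b t hb]
  ring

theorem loopA_eq (p1 p2 page L : Int)
    (ha : 0 < |p1|) (hb : 0 < |p2|)
    (hL0 : 0 ≤ L) (hLge : page ≤ cnt |p1| |p2| L)
    (hmin : ∀ u, 0 ≤ u → u < L → cnt |p1| |p2| u < page) :
    ∀ fuel (t : Int), 0 ≤ t → t ≤ L → (L - t).toNat ≤ fuel →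
      printTimeLoop p1 p2 page (cnt |p1| |p2| t) t fuel = L := by
  intro fuel
  induction fuel with
  | zero =>
    intro t h0 hL hf
    have : t = L := by omega
    simp [printTimeLoop, this]
  | succ n ih =>
    intro t h0 hL hf
    by_cases htL : t = L
    · subst htL
      have : ¬ cnt |p1| |p2| t < page := not_lt.mpr hLge
      simp [printTimeLoop, this]
    · have htlt : t < L := lt_of_le_of_ne hL htL
      have hlt : cnt |p1| |p2| t < page := hmin t h0 htlt
      have hd1 : (PySem.Int.mod (t + 1) p1 = 0) ↔ (|p1| ∣ (t + 1)) := by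
        rw [PySem.Int.mod_eq_zero_iff_dvd, abs_dvd]
      have hd2 : (PySem.Int.mod (t + 1) p2 = 0) ↔ (|p2| ∣ (t + 1)) := by
        rw [PySem.Int.mod_eq_zero_iff_dvd, abs_dvd]
      have hstep : (if PySem.Int.mod (t + 1) p2 = 0 then
            (if PySem.Int.mod (t + 1) p1 = 0 then cnt |p1| |p2| t + 1 else cnt |p1| |p2| t) + 1
          else
            (if PySem.Int.mod (t + 1) p1 = 0 then cnt |p1| |p2| t + 1 else cnt |p1| |p2| t)) =
          cnt |p1| |p2| (t + 1) := by
        rw [cnt_succ |p1| |p2| t ha hb]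
        by_cases h1 : |p1| ∣ (t + 1) <;> by_cases h2 : |p2| ∣ (t + 1) <;>
          simp [hd1, hd2, h1, h2]
      simp only [printTimeLoop, if_pos hlt]
      rw [hstep]
      exact ih (t + 1) (by omega) (by omega) (by omega)

theorem bsLoop_eq (a b page L : Int)
    (ha : 0 < a) (hb : 0 < b) (hL0 : 0 ≤ L)
    (hLge : page ≤ cnt a b L)
    (hmin : ∀ u, 0 ≤ u → u < L → cnt a b u < page) :
    ∀ fuel (lo hi : Int), 0 ≤ lo → lo < hi →
      cnt a b lo < page → page ≤ cnt a b hi → (hi - lo).toNat ≤ fuel →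
      bsLoop a b page lo hi fuel = L := by
  intro fuel
  induction fuel with
  | zero =>
    intro lo hi hlo0 hlohi _ _ hf
    omega
  | succ n ih =>
    intro lo hi hlo0 hlohi hclo hchi hf
    by_cases h : 1 < hi - lo
    · have hm : PySem.Int.floordiv (lo + hi) 2 = (lo + hi) / 2 :=
        PySem.Int.floordiv_eq_ediv_of_pos (by norm_num)
      have hcm : PySem.Int.floordiv ((lo + hi) / 2) a + PySem.Int.floordiv ((lo + hi) / 2) b =
          cnt a b ((lo + hi) / 2) := by
        rw [PySem.Int.floordiv_eq_ediv_of_pos ha, PySem.Int.floordiv_eq_ediv_of_pos hb]; rfl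
      simp only [bsLoop, if_pos h, hm, hcm]
      by_cases hc : page ≤ cnt a b ((lo + hi) / 2)
      · rw [if_pos hc]
        exact ih lo ((lo + hi) / 2) hlo0 (by omega) hclo hc (by omega)
      · rw [if_neg hc]
        exact ih ((lo + hi) / 2) hi (by omega) (by omega) (not_le.mp hc) hchi (by omega)
    · have h1 : L ≤ hi := by
        by_contra hcon
        exact absurd hchi (not_le.mpr (hmin hi (by omega) (by omega)))
      have h2 : lo < L := by
        by_contra hcon
        have := cnt_mono a b L lo ha hb (not_lt.mp hcon)
        omega
      simp only [bsLoop, if_neg h]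
      omega

theorem cnt_witness (a b page : Int) (ha : 0 < a) (hb : 0 < b) (hp : 0 < page) :
    page ≤ cnt a b (min a b * page) := by
  unfold cnt
  rcases min_cases a b with ⟨h1, _⟩ | ⟨h1, _⟩ <;> rw [h1]
  · have e : a * page / a = page := Int.mul_ediv_cancel_left _ (ne_of_gt ha)
    have h2 : 0 ≤ a * page / b := Int.ediv_nonneg (by positivity) hb.le
    omega
  · have e : b * page / b = page := Int.mul_ediv_cancel_left _ (ne_of_gt hb)
    have h2 : 0 ≤ b * page / a := Int.ediv_nonneg (by positivity) ha.le
    omega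

-- ===== VERDICT (by name: the statement is the Claim_ definition above) =====
theorem printTime_spec : Claim_equal_printTime := by
  unfold Claim_equal_printTime Spec_printTime
  intro p1 p2 page _ hpre
  by_cases hp : page ≤ 0
  · unfold printTime printTime_alt
    rw [if_pos hp]
    have hnp : ¬ (0 : Int) < page := by omega
    simp [printTimeLoop, hnp]
  · rw [not_le] at hp
    have hpz : p1 ≠ 0 ∧ p2 ≠ 0 := by
      rcases hpre with h | h
      · exact h
      · omega
    obtain ⟨h1, h2⟩ := hpz
    have ha : 0 < |p1| := abs_pos.mpr h1
    have hb : 0 < |p2| := abs_pos.mpr h2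
    have hmp : 0 < min |p1| |p2| * page := mul_pos (lt_min ha hb) hp
    have hex : ∃ n : Nat, page ≤ cnt |p1| |p2| (n : Int) := by
      refine ⟨(min |p1| |p2| * page).toNat, ?_⟩
      rw [Int.toNat_of_nonneg hmp.le]
      exact cnt_witness _ _ _ ha hb hp
    have hspec : page ≤ cnt |p1| |p2| ((Nat.find hex : Nat) : Int) := Nat.find_spec hex
    have hmin : ∀ u : Int, 0 ≤ u → u < ((Nat.find hex : Nat) : Int) →
        cnt |p1| |p2| u < page := by
      intro u h0 hu
      have hm := Nat.find_min hex (m := u.toNat) (by omega)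
      rw [show ((u.toNat : Nat) : Int) = u from Int.toNat_of_nonneg h0] at hm
      exact not_le.mp hm
    have hL0 : (0 : Int) ≤ ((Nat.find hex : Nat) : Int) := Int.natCast_nonneg _
    have hNle : ((Nat.find hex : Nat) : Int) ≤ min |p1| |p2| * page := by
      have hm := Nat.find_min' hex (m := (min |p1| |p2| * page).toNat)
        (by rw [Int.toNat_of_nonneg hmp.le]; exact cnt_witness _ _ _ ha hb hp)
      omega
    have hA : printTime p1 p2 page = ((Nat.find hex : Nat) : Int) := by
      unfold printTime
      have hc0 : cnt |p1| |p2| 0 = 0 := by simp [cnt]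
      have := loopA_eq p1 p2 page _ ha hb hL0 hspec hmin
        ((min |p1| |p2| * page).toNat + 1) 0 le_rfl hL0 (by omega)
      rw [hc0] at this
      exact this
    have hB : printTime_alt p1 p2 page = ((Nat.find hex : Nat) : Int) := by
      unfold printTime_alt
      rw [if_neg (not_le.mpr hp)]
      refine bsLoop_eq _ _ _ _ ha hb hL0 hspec hmin _ 0 _ le_rfl hmp ?_ ?_ (by omega)
      · simp [cnt]; omega
      · exact cnt_witness _ _ _ ha hb hp
    rw [hA, hB]
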